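-- pv_equiv track=rewrite | github.com/md-ward/my-Kata-solutions- | All Inclusive.py | contain_all_rots
-- ===== SOURCE A (Python) =====
-- def getAllRotations(str):
--     all_rot = []
--     lenn = len(str)
--
--     # Generate all rotations
--     # one by one and print
--     temp = [0] * (lenn)
--     for i in range(lenn):
--         j = i  # Current index in str
--         k = 0  # Current index in temp
--
--         # Copying the second part from
--         # the point of rotation.
--         while (j < len(str)):
--
--             temp[k] = str[j]
--             k += 1
--             j += 1
--
--         # Copying the first part from
--         # the point of rotation.
--         j = 0
--         while (j < i):
--
--             temp[k] = str[j]
--             j += 1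
--             k += 1
--         all_rot.append(''.join(temp))
--     return all_rot
--
-- def contain_all_rots(strng, arr):
--     if strng == '':
--         return True
--     temp = getAllRotations(strng)
--     check = all(item in arr for item in temp)
--
--     if check:
--         return True
--     else :return False
-- ===== SOURCE B (Python) =====
-- def contain_all_rots(strng, arr):
--     if strng == '':
--         return True
--     n = len(strng)
--     doubled = strng + strng
--     rots = {doubled[i:i+n] for i in range(n)}
--     seen = {x for x in arr if len(x) == n and x in doubled}
--     return rots <= seen
-- ===== Notes on version B (the rewrite author's own statement) =====
-- stated objective: faster
-- what changed: Instead of generating each rotation by index-copy loops and scanning arr for each one, B slices the doubled string for the distinct rotations and scans arr once, keeping strings of the right length that occur in strng+strng (rotation = substring of s+s), then checks set inclusion.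
import Mathlib
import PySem

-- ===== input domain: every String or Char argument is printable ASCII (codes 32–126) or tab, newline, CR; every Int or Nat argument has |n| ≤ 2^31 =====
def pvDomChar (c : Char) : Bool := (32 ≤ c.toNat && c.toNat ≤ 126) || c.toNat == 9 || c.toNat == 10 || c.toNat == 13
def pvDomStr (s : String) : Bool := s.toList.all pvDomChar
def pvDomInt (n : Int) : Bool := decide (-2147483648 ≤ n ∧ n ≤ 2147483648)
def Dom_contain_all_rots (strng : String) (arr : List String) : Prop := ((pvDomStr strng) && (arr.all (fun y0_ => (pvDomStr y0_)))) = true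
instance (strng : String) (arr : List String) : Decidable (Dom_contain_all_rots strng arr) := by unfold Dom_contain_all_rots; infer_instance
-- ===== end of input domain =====

-- B replaces A's per-rotation index-copy generation and per-rotation scans of arr by slicing the
-- doubled string and a single filtered pass over arr with a substring test, then a set-inclusion check.


-- ===== PORT A =====
-- 'while (j < len(str)): temp[k] = str[j]; k += 1; j += 1' — copies str[j:] into temp starting at k
def rotCopy1 (s temp : List Char) (j k : Nat) : List Char × Nat :=
  if j < s.length then rotCopy1 s (temp.set k (s.getD j ' ')) (j + 1) (k + 1)
  else (temp, k)
termination_by s.length - j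

-- 'while (j < i): temp[k] = str[j]; j += 1; k += 1' — copies str[:i] into temp starting at k
def rotCopy2 (i : Nat) (s temp : List Char) (j k : Nat) : List Char :=
  if j < i then rotCopy2 i s (temp.set k (s.getD j ' ')) (j + 1) (k + 1)
  else temp
termination_by i - j

-- temp = [0]*lenn is all-overwritten before the join; ported as a Char buffer (''.join of the
-- 1-char strings is exactly String.ofList of the chars)
def getAllRotations (str : String) : List String :=
  let s := str.toList
  let lenn := s.length
  (List.range lenn).foldl (fun all_rot i =>
    let t1 := rotCopy1 s (List.replicate lenn ' ') i 0
    let temp := rotCopy2 i s t1.1 0 t1.2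
    all_rot ++ [String.ofList temp]) []

def contain_all_rots (strng : String) (arr : List String) : Bool :=
  if strng == "" then true
  else
    let temp := getAllRotations strng
    let check := temp.all (fun item => arr.contains item)
    if check then true else false

-- ===== PORT B =====
def contain_all_rots_alt (strng : String) (arr : List String) : Bool :=
  if strng == "" then true
  else
    let n := strng.toList.length
    let doubled := String.ofList (strng.toList ++ strng.toList)  -- strng + strng
    let rots : PySem.Set String :=
      PySem.Set.ofList ((List.range n).map (fun (i : Nat) =>
        PySem.Str.slice doubled (some (i : Int)) (some ((i : Int) + (n : Int)))))
    let seen : PySem.Set String :=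
      PySem.Set.ofList (arr.filter (fun x =>
        x.toList.length == n && PySem.Str.isIn x doubled))
    PySem.Set.issubset rots seen

-- ===== PRECONDITION & SPEC =====
def Spec_contain_all_rots (strng : String) (arr : List String) (out : Bool) : Prop := out = contain_all_rots_alt strng arr
instance (strng : String) (arr : List String) (out : Bool) : Decidable (Spec_contain_all_rots strng arr out) := by unfold Spec_contain_all_rots; infer_instance

-- ===== CLAIM (what is proved, stated in full; the proofs are below) =====
def Claim_equal_contain_all_rots : Prop := ∀ (strng : String) (arr : List String), Dom_contain_all_rots strng arr → Spec_contain_all_rots strng arr (contain_all_rots strng arr)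

-- ===== LEMMAS AND PROOFS =====

theorem pv_if_bool (b : Bool) : (if b = true then true else false) = b := by cases b <;> rfl

theorem rotCopy1_spec_aux (s : List Char) : ∀ (m j k : Nat) (temp : List Char),
    s.length - j = m → j ≤ s.length → k + (s.length - j) ≤ temp.length →
    rotCopy1 s temp j k =
      (temp.take k ++ s.drop j ++ temp.drop (k + (s.length - j)), k + (s.length - j)) := by
  intro m
  induction m with
  | zero =>
    intro j k temp hm hj hk
    have hj' : j = s.length := by omega
    subst hj'
    rw [rotCopy1, if_neg (by omega)]
    simp
  | succ m ih =>
    intro j k temp hm hj hk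
    have h : j < s.length := by omega
    rw [rotCopy1, if_pos h]
    rw [ih (j + 1) (k + 1) (temp.set k (s.getD j ' ')) (by omega) (by omega)
      (by simp only [List.length_set]; omega)]
    have hkt : k < temp.length := by omega
    have harith : k + 1 + (s.length - (j + 1)) = k + (s.length - j) := by omega
    have hset : temp.set k (s.getD j ' ') = temp.take k ++ s.getD j ' ' :: temp.drop (k + 1) :=
      List.set_eq_take_cons_drop _ hkt
    have htake : (temp.set k (s.getD j ' ')).take (k + 1) = temp.take k ++ [s.getD j ' '] := by
      rw [hset, List.take_append]
      simp [List.length_take, Nat.min_eq_left (le_of_lt hkt)]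
    have hdrop : (temp.set k (s.getD j ' ')).drop (k + 1 + (s.length - (j + 1))) =
        temp.drop (k + 1 + (s.length - (j + 1))) := by
      rw [List.drop_set, if_pos (by omega)]
    have hgd : s.getD j ' ' = s[j] := List.getD_eq_getElem s ' ' h
    have hsd : s.drop j = s[j] :: s.drop (j + 1) := List.drop_eq_getElem_cons h
    rw [htake, hdrop, hgd, hsd, harith]
    simp

theorem rotCopy1_spec (s : List Char) (j k : Nat) (temp : List Char)
    (hj : j ≤ s.length) (hk : k + (s.length - j) ≤ temp.length) :
    rotCopy1 s temp j k =
      (temp.take k ++ s.drop j ++ temp.drop (k + (s.length - j)), k + (s.length - j)) :=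
  rotCopy1_spec_aux s (s.length - j) j k temp rfl hj hk

theorem rotCopy2_spec_aux (s : List Char) (i : Nat) (hi : i ≤ s.length) : ∀ (m j k : Nat)
    (temp : List Char), i - j = m → j ≤ i → k + (i - j) ≤ temp.length →
    rotCopy2 i s temp j k = temp.take k ++ (s.take i).drop j ++ temp.drop (k + (i - j)) := by
  intro m
  induction m with
  | zero =>
    intro j k temp hm hj hk
    have hj' : j = i := by omega
    subst hj'
    rw [rotCopy2, if_neg (by omega)]
    simp
  | succ m ih =>
    intro j k temp hm hj hk
    have h : j < i := by omega
    rw [rotCopy2, if_pos h]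
    rw [ih (j + 1) (k + 1) (temp.set k (s.getD j ' ')) (by omega) (by omega)
      (by simp only [List.length_set]; omega)]
    have hkt : k < temp.length := by omega
    have hjs : j < s.length := by omega
    have harith : k + 1 + (i - (j + 1)) = k + (i - j) := by omega
    have hset : temp.set k (s.getD j ' ') = temp.take k ++ s.getD j ' ' :: temp.drop (k + 1) :=
      List.set_eq_take_cons_drop _ hkt
    have htake : (temp.set k (s.getD j ' ')).take (k + 1) = temp.take k ++ [s.getD j ' '] := by
      rw [hset, List.take_append]
      simp [List.length_take, Nat.min_eq_left (le_of_lt hkt)]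
    have hdrop : (temp.set k (s.getD j ' ')).drop (k + 1 + (i - (j + 1))) =
        temp.drop (k + 1 + (i - (j + 1))) := by
      rw [List.drop_set, if_pos (by omega)]
    have hjt : j < (s.take i).length := by simp [List.length_take]; omega
    have hgd : s.getD j ' ' = (s.take i)[j] := by
      rw [List.getD_eq_getElem s ' ' hjs]
      simp [List.getElem_take]
    have hsd : (s.take i).drop j = (s.take i)[j] :: (s.take i).drop (j + 1) :=
      List.drop_eq_getElem_cons hjt
    rw [htake, hdrop, hgd, hsd, harith]
    simp

theorem rotCopy2_spec (s : List Char) (i : Nat) (hi : i ≤ s.length) (j k : Nat) (temp : List Char)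
    (hj : j ≤ i) (hk : k + (i - j) ≤ temp.length) :
    rotCopy2 i s temp j k = temp.take k ++ (s.take i).drop j ++ temp.drop (k + (i - j)) :=
  rotCopy2_spec_aux s i hi (i - j) j k temp rfl hj hk

theorem getAllRotations_eq (str : String) :
    getAllRotations str = (List.range str.toList.length).map
      (fun i => String.ofList (str.toList.drop i ++ str.toList.take i)) := by
  unfold getAllRotations
  rw [PySem.List.foldl_append_singleton_eq_map]
  apply List.map_congr_left
  intro i hi
  rw [List.mem_range] at hi
  set s := str.toList with hs
  set n := s.length with hn
  rw [rotCopy1_spec s i 0 (List.replicate n ' ') (by omega) (by simp [← hn])]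
  simp only [List.take_zero, List.nil_append, List.drop_replicate, Nat.zero_add]
  have hlen1 : (s.drop i ++ List.replicate (n - (n - i)) ' ').length = n := by
    simp [List.length_drop, ← hn]
  rw [rotCopy2_spec s i (by omega) 0 (n - i) (s.drop i ++ List.replicate (n - (n - i)) ' ')
    (by omega) (by rw [hlen1]; omega)]
  have htk : (s.drop i ++ List.replicate (n - (n - i)) ' ').take (n - i) = s.drop i := by
    rw [List.take_append]
    simp [List.length_drop, ← hn]
  have hdp : (s.drop i ++ List.replicate (n - (n - i)) ' ').drop (n - i + (i - 0)) = [] := by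
    apply List.drop_eq_nil_of_le
    rw [hlen1]; omega
  rw [htk, hdp]
  simp

theorem rotation_toList (str : String) (i : Nat) (hi : i < str.toList.length) :
    (PySem.Str.slice (String.ofList (str.toList ++ str.toList)) (some (i : Int))
        (some ((i : Int) + (str.toList.length : Int)))).toList =
      str.toList.drop i ++ str.toList.take i := by
  set s := str.toList with hs
  set n := s.length with hn
  have : (PySem.Str.slice (String.ofList (s ++ s)) (some (i : Int)) (some ((i : Int) + (n : Int)))).toList
      = PySem.List.slice (String.ofList (s ++ s)).toList (some (i : Int)) (some ((i : Int) + (n : Int))) := by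
    simp [PySem.Str.toList_slice]
  rw [this, PySem.List.slice_natCast_add]
  have hofl : (String.ofList (s ++ s)).toList = s ++ s := by simp
  rw [hofl, List.drop_append, List.take_append]
  have h1 : s.drop (i - n) = s.drop 0 := by congr 1; omega
  rw [h1]
  simp only [List.drop_zero, List.length_drop]
  have h2 : (s.drop i).take n = s.drop i := List.take_of_length_le (by simp [← hn])
  have h3 : (s.take (n - (n - i))) = s.take i := by congr 1; omega
  rw [← hn] at *
  rw [h2, h3]

-- ===== VERDICT (by name: the statement is the Claim_ definition above) =====
theorem contain_all_rots_spec : Claim_equal_contain_all_rots := by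
  intro strng arr _
  unfold Spec_contain_all_rots contain_all_rots contain_all_rots_alt
  by_cases hs : strng == ""
  · simp [hs]
  · simp only [hs, Bool.false_eq_true, if_false]
    rw [pv_if_bool]
    set s := strng.toList with hsdef
    set n := s.length with hn
    rw [getAllRotations_eq]
    have hmap : (List.range n).map (fun (i : Nat) =>
        PySem.Str.slice (String.ofList (s ++ s)) (some (i : Int)) (some ((i : Int) + (n : Int)))) =
        (List.range n).map (fun i => String.ofList (s.drop i ++ s.take i)) := by
      apply List.map_congr_left
      intro i hi
      rw [List.mem_range] at hi
      rw [← String.toList_inj, rotation_toList strng i (by rw [← hsdef, ← hn]; exact hi)]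
      simp [← hsdef]
    rw [hmap]
    rw [Bool.eq_iff_iff, List.all_eq_true, PySem.Set.issubset_iff]
    constructor
    · intro h x hx
      rw [PySem.Set.mem_ofList, List.mem_map] at hx
      obtain ⟨i, hi, rfl⟩ := hx
      rw [List.mem_range] at hi
      have hxa := h _ (List.mem_map.mpr ⟨i, List.mem_range.mpr hi, rfl⟩)
      rw [PySem.Set.mem_ofList, List.mem_filter]
      refine ⟨by simpa using hxa, ?_⟩
      rw [Bool.and_eq_true]
      constructor
      · simp [List.length_drop, List.length_take, ← hn]
        omega
      · rw [PySem.Str.isIn_iff_infix]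
        have hofl : (String.ofList (s ++ s)).toList = s ++ s := by simp
        have hx : (String.ofList (s.drop i ++ s.take i)).toList = s.drop i ++ s.take i := by simp
        rw [hofl, hx]
        exact ⟨s.take i, s.drop i, by
          simp only [List.append_assoc, List.take_append_drop]
          rw [← List.append_assoc, List.take_append_drop]⟩
    · intro h x hx
      have hxs := h x (PySem.Set.mem_ofList _ _ |>.mpr hx)
      rw [PySem.Set.mem_ofList, List.mem_filter] at hxs
      simpa using hxs.1
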